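-- pv_equiv track=rewrite | github.com/asiftm/Semester2-Scripting | assignments/licence_plate_with_regex.py | forbidden
-- ===== SOURCE A (Python) =====
-- def forbidden(plate):
--     forbidden_letter_combinations = 'AAP AAS AEL ALA ANE ASS BEB BIT BOM BOY BSP BUB BWP BYT CAP CDF CDH CDV CON CSP CUB CUL CUT CVP DCD DIK DOM FDF FOK FOL FOU FUC FUK GAT GAY GEK GOD HIV HOL JEK KAK KKQ KUL KUT LAF LDD LSP LUL MAS MCC MDP MOR MOU MST NIC NIK NIQ NVA PDB PDO PET PFF PIK PIN PIP PIS PJU PKK POT PRL PSB PSC PSL PTB PUE PUT PVV PYK PYN PYP PYS ROM SEX SOA SOT SPA SUL TAK TET TIT TUE VCD VIH VLD VMO VNV ZAC ZAK ZOT'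
--     forbidden_list = forbidden_letter_combinations.split(' ')
--     condition = False
--     for i in forbidden_list:
--         if i in plate:
--             condition = True
--             break
--         else:
--             condition = False
--     return (condition)
-- ===== SOURCE B (Python) =====
-- FORBIDDEN_SET = set('AAP AAS AEL ALA ANE ASS BEB BIT BOM BOY BSP BUB BWP BYT CAP CDF CDH CDV CON CSP CUB CUL CUT CVP DCD DIK DOM FDF FOK FOL FOU FUC FUK GAT GAY GEK GOD HIV HOL JEK KAK KKQ KUL KUT LAF LDD LSP LUL MAS MCC MDP MOR MOU MST NIC NIK NIQ NVA PDB PDO PET PFF PIK PIN PIP PIS PJU PKK POT PRL PSB PSC PSL PTB PUE PUT PVV PYK PYN PYP PYS ROM SEX SOA SOT SPA SUL TAK TET TIT TUE VCD VIH VLD VMO VNV ZAC ZAK ZOT'.split(' '))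
--
-- def forbidden(plate):
--     return any(plate[i:i+3] in FORBIDDEN_SET for i in range(len(plate) - 2))
-- ===== Notes on version B (the rewrite author's own statement) =====
-- stated objective: idiomatic
-- what changed: Instead of testing each of the 93 forbidden patterns for substring membership in the plate, B builds the forbidden patterns into a set once and slides a length-3 window over the plate, checking each trigram against the set with any().
import Mathlib
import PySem

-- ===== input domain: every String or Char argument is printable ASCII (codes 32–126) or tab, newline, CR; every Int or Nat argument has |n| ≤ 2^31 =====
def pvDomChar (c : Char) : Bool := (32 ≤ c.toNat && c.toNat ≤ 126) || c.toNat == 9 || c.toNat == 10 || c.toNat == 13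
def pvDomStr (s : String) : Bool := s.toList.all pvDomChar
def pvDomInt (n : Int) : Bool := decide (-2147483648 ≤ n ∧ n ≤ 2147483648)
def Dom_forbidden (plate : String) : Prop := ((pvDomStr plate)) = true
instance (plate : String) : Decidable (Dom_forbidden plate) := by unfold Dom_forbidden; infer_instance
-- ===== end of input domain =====

-- B replaces A's loop over the 93 forbidden patterns (substring test for each) by one
-- sliding length-3 window over the plate checked against a set of the patterns (idiomatic).

def forbiddenCombos : String := "AAP AAS AEL ALA ANE ASS BEB BIT BOM BOY BSP BUB BWP BYT CAP CDF CDH CDV CON CSP CUB CUL CUT CVP DCD DIK DOM FDF FOK FOL FOU FUC FUK GAT GAY GEK GOD HIV HOL JEK KAK KKQ KUL KUT LAF LDD LSP LUL MAS MCC MDP MOR MOU MST NIC NIK NIQ NVA PDB PDO PET PFF PIK PIN PIP PIS PJU PKK POT PRL PSB PSC PSL PTB PUE PUT PVV PYK PYN PYP PYS ROM SEX SOA SOT SPA SUL TAK TET TIT TUE VCD VIH VLD VMO VNV ZAC ZAK ZOT"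

-- ===== PORT A =====
-- the for-loop with break: recursion over the remaining patterns, stopping at the first hit
def forbiddenLoop (plate : String) : List String → Bool
  | [] => false
  | i :: rest => if PySem.Str.isIn i plate then true else forbiddenLoop plate rest

def forbidden (plate : String) : Bool :=
  -- .split(' '): sep is the nonempty " ", so split? is always some; getD [] only discharges the option
  let forbiddenList := (PySem.Str.split? forbiddenCombos " ").getD []
  forbiddenLoop plate forbiddenList

-- ===== PORT B =====
def forbiddenSet : PySem.Set String :=
  PySem.Set.ofList ((PySem.Str.split? forbiddenCombos " ").getD [])

def forbidden_alt (plate : String) : Bool :=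
  (PySem.List.pyRange 0 (PySem.Str.len plate - 2) 1).any (fun i =>
    PySem.Set.contains forbiddenSet (PySem.Str.slice plate (some i) (some (i + 3))))

-- ===== PRECONDITION & SPEC =====
def Spec_forbidden (plate : String) (out : Bool) : Prop := out = forbidden_alt plate
instance (plate : String) (out : Bool) : Decidable (Spec_forbidden plate out) := by unfold Spec_forbidden; infer_instance

-- ===== CLAIM (what is proved, stated in full; the proofs are below) =====
def Claim_equal_forbidden : Prop := ∀ (plate : String), Dom_forbidden plate → Spec_forbidden plate (forbidden plate)

-- ===== LEMMAS AND PROOFS =====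

-- the forbidden list as a literal
def patList : List String := ["AAP","AAS","AEL","ALA","ANE","ASS","BEB","BIT","BOM","BOY","BSP","BUB","BWP","BYT","CAP","CDF","CDH","CDV","CON","CSP","CUB","CUL","CUT","CVP","DCD","DIK","DOM","FDF","FOK","FOL","FOU","FUC","FUK","GAT","GAY","GEK","GOD","HIV","HOL","JEK","KAK","KKQ","KUL","KUT","LAF","LDD","LSP","LUL","MAS","MCC","MDP","MOR","MOU","MST","NIC","NIK","NIQ","NVA","PDB","PDO","PET","PFF","PIK","PIN","PIP","PIS","PJU","PKK","POT","PRL","PSB","PSC","PSL","PTB","PUE","PUT","PVV","PYK","PYN","PYP","PYS","ROM","SEX","SOA","SOT","SPA","SUL","TAK","TET","TIT","TUE","VCD","VIH","VLD","VMO","VNV","ZAC","ZAK","ZOT"]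

set_option maxRecDepth 4000 in
theorem split_eval : PySem.Str.split? forbiddenCombos " " = some patList := by
  simp [PySem.Str.split?, PySem.Chars.split?, PySem.Chars.splitOn, PySem.Chars.splitOn.go,
        forbiddenCombos, patList]

theorem patList_len3 : ∀ p ∈ patList, p.toList.length = 3 := by decide

-- the break-loop is List.any
theorem forbiddenLoop_eq_any (plate : String) (l : List String) :
    forbiddenLoop plate l = l.any (fun p => PySem.Str.isIn p plate) := by
  induction l with
  | nil => rfl
  | cons p rest ih => simp [forbiddenLoop, ih]

-- a length-3 infix is exactly a length-3 window
theorem window_iff (l p : List Char) (hp : p.length = 3) :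
    p <:+: l ↔ ∃ j : ℕ, j + 3 ≤ l.length ∧ (l.drop j).take 3 = p := by
  constructor
  · rintro ⟨s, t, rfl⟩
    refine ⟨s.length, by simp [hp], ?_⟩
    rw [List.append_assoc, List.drop_left, ← hp, List.take_left]
  · rintro ⟨j, hj, hw⟩
    refine ⟨l.take j, l.drop (j + 3), ?_⟩
    rw [← hw]
    have h1 : l.drop (j + 3) = (l.drop j).drop 3 := by
      rw [List.drop_drop, Nat.add_comm]
    rw [List.append_assoc, h1, List.take_append_drop, List.take_append_drop]

theorem len_eval (plate : String) : PySem.Str.len plate = (plate.toList.length : Int) := by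
  simp [PySem.Str.len]

theorem slice_eval (plate : String) (j : ℕ) :
    (PySem.Str.slice plate (some (j : Int)) (some ((j : Int) + 3))).toList
      = (plate.toList.drop j).take 3 := by
  rw [PySem.Str.toList_slice, PySem.Chars.slice_eq_listSlice]
  have : ((3 : Int)) = ((3 : ℕ) : Int) := by norm_num
  rw [this, PySem.List.slice_natCast_add]

theorem forbidden_eq_alt (plate : String) : forbidden plate = forbidden_alt plate := by
  unfold forbidden forbidden_alt forbiddenSet
  rw [split_eval]
  simp only [Option.getD_some, forbiddenLoop_eq_any]
  rw [Bool.eq_iff_iff]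
  simp only [List.any_eq_true]
  constructor
  · rintro ⟨p, hpmem, hin⟩
    rw [PySem.Str.isIn_iff_infix] at hin
    obtain ⟨j, hj, hw⟩ := (window_iff _ _ (patList_len3 p hpmem)).mp hin
    refine ⟨(j : Int), ?_, ?_⟩
    · rw [PySem.List.mem_pyRange_one, len_eval]
      omega
    · rw [PySem.Set.contains_iff, PySem.Set.mem_ofList]
      have : PySem.Str.slice plate (some (j : Int)) (some ((j : Int) + 3)) = p := by
        rw [← String.toList_inj, slice_eval, hw]
      rw [this]; exact hpmem
  · rintro ⟨i, hi, hc⟩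
    rw [PySem.List.mem_pyRange_one, len_eval] at hi
    rw [PySem.Set.contains_iff, PySem.Set.mem_ofList] at hc
    refine ⟨_, hc, ?_⟩
    rw [PySem.Str.isIn_iff_infix]
    have hi' : i = ((i.toNat : ℕ) : Int) := by omega
    rw [window_iff _ _ (patList_len3 _ hc)]
    refine ⟨i.toNat, by omega, ?_⟩
    rw [← slice_eval plate i.toNat, ← hi']

-- ===== VERDICT (by name: the statement is the Claim_ definition above) =====
theorem forbidden_spec : Claim_equal_forbidden := by
  intro plate _
  unfold Spec_forbidden
  exact forbidden_eq_alt plate
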